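-- pv_equiv track=rewrite | github.com/DSAlgoTeam/Algorithms | Python/Algorithms/aditya/hashing.py | search
-- ===== SOURCE A (Python) =====
-- def hash(Hash_table,key) :
--     if type(key) == int :
--         return  int(key) % len(Hash_table)
--     else :
--         sum = 0
--         for i in key :
--             sum += ord(i)
--         return sum % len(Hash_table)
--
-- def rehash_linear(pos,length) :
--     return (pos + 1)%length
--
-- def search(Hash_table,key) :
--     length = len(Hash_table)
--     hash_key = hash(Hash_table,key)
--     if Hash_table[hash_key] == key :
--         return True
--     elif Hash_table[hash_key] is None :
--         return False
--     else :
--         i = rehash_linear(hash_key,length)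
--         while i != hash_key  :
--             if Hash_table[i] == key :
--                 return True
--             if Hash_table[i] is None  :
--                 return False
--             i = rehash_linear(i,length)
--     return False
-- ===== SOURCE B (Python) =====
-- def hash(Hash_table, key):
--     if type(key) == int:
--         return int(key) % len(Hash_table)
--     else:
--         sum = 0
--         for i in key:
--             sum += ord(i)
--         return sum % len(Hash_table)
--
-- def search(Hash_table, key):
--     # Build the whole probe sequence up front as a rotation of the table,
--     # truncate it at the first empty slot, then answer by plain membership.
--     h = hash(Hash_table, key)
--     probe = Hash_table[h:] + Hash_table[:h]
--     if None in probe: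
--         probe = probe[:probe.index(None)]
--     return key in probe
-- ===== Notes on version B (the rewrite author's own statement) =====
-- stated objective: alternative
-- what changed: Instead of probing slot by slot with modular rehashing, B materialises the whole probe order as a rotation of the table (Hash_table[h:] + Hash_table[:h]), truncates it at the first None via index(), and answers with a plain membership test; the probe loop, rehash helper and wrap-around check disappear.
import Mathlib
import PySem

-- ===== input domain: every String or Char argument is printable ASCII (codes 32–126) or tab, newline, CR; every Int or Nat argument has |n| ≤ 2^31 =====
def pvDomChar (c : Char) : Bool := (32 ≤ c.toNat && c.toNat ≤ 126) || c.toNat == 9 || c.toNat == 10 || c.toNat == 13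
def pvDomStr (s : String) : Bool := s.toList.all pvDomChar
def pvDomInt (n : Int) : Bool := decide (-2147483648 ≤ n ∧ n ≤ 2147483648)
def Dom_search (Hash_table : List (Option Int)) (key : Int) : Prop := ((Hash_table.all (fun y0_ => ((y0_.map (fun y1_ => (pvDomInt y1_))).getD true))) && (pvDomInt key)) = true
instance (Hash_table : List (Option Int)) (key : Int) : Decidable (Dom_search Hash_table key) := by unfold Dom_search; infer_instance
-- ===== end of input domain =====

-- B replaces A's slot-by-slot probe loop (peeled first slot, rehash helper, wrap-around
-- check) by: materialise the probe order as a rotation of the table, truncate it at the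
-- first None, then a plain membership test (objective: alternative).

-- ===== PORT A =====
-- hash(Hash_table, key) with key an int (the non-int branch is unreachable: key : Int): int(key) % len(Hash_table)
def hashInt (Hash_table : List (Option Int)) (key : Int) : Int :=
  PySem.Int.mod key (Hash_table.length : Int)

-- rehash_linear(pos, length)
def rehashLinear (pos : Int) (length : Int) : Int :=
  PySem.Int.mod (pos + 1) length

-- the while-loop of A: 'while i != hash_key: …'; it makes at most length-1
-- iterations (i steps cyclically from hash_key+1 back to hash_key), so fuel =
-- length is enough and the fuel-0 branch is never reached on the admitted inputs.
def searchWhile (Hash_table : List (Option Int)) (key hash_key length : Int) :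
    Nat → Int → Bool
  | 0, _ => false
  | fuel + 1, i =>
    if i = hash_key then false
    else
      let v := (PySem.List.pyGet? Hash_table i).getD none
      if v = some key then true
      else if v = none then false
      else searchWhile Hash_table key hash_key length fuel (rehashLinear i length)

def search (Hash_table : List (Option Int)) (key : Int) : Bool :=
  let length : Int := (Hash_table.length : Int)
  let hash_key := hashInt Hash_table key
  let v0 := (PySem.List.pyGet? Hash_table hash_key).getD none
  if v0 = some key then true
  else if v0 = none then false
  else searchWhile Hash_table key hash_key length Hash_table.length
    (rehashLinear hash_key length)

-- ===== PORT B =====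
def search_alt (Hash_table : List (Option Int)) (key : Int) : Bool :=
  let h := hashInt Hash_table key
  -- probe = Hash_table[h:] + Hash_table[:h]
  let probe := PySem.List.slice Hash_table (some h) none ++ PySem.List.slice Hash_table none (some h)
  -- if None in probe: probe = probe[:probe.index(None)]  (the index exists: membership was just checked)
  let probe2 :=
    if probe.contains none then
      PySem.List.slice probe none (some ((((PySem.List.index? probe none).getD 0 : Nat)) : Int))
    else probe
  -- key in probe
  probe2.contains (some key)

-- ===== PRECONDITION & SPEC =====
-- Pre_ excludes only the empty table, on which A raises ZeroDivisionError in hash().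
def Pre_search (Hash_table : List (Option Int)) (key : Int) : Prop := Hash_table ≠ []
instance (Hash_table : List (Option Int)) (key : Int) : Decidable (Pre_search Hash_table key) := by unfold Pre_search; infer_instance
def pvWitness_search : List (Option Int) × Int := ([some 3, none, some 5], 5)

def Spec_search (Hash_table : List (Option Int)) (key : Int) (out : Bool) : Prop := out = search_alt Hash_table key
instance (Hash_table : List (Option Int)) (key : Int) (out : Bool) : Decidable (Spec_search Hash_table key out) := by unfold Spec_search; infer_instance

-- ===== CLAIM (what is proved, stated in full; the proofs are below) =====
def Claim_equal_search : Prop := ∀ (Hash_table : List (Option Int)) (key : Int), Dom_search Hash_table key → Pre_search Hash_table key → Spec_search Hash_table key (search Hash_table key)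

-- ===== LEMMAS AND PROOFS =====

-- first-match scan semantics shared by the two programs (proof device only)
def scanL (key : Int) : List (Option Int) → Bool
  | [] => false
  | v :: rest => if v = some key then true else if v = none then false else scanL key rest

-- B's truncate-then-membership expression computes the first-match scan
theorem alt_eq_scan (key : Int) : ∀ (l : List (Option Int)),
    (if l.contains none then
        (l.take ((PySem.List.index? l none).getD 0)).contains (some key)
      else l.contains (some key)) = scanL key l := by
  intro l
  induction l with
  | nil => simp [scanL]
  | cons v rest ih =>
    by_cases hv : v = none
    · subst hv
      rw [PySem.List.index?_cons_self]
      simp [scanL]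
    · have hv' : ¬ none = v := fun h => hv h.symm
      rw [PySem.List.index?_cons_of_ne (x := v) (v := none) rest hv]
      by_cases hmem : none ∈ rest
      · have : (PySem.List.index? rest none).isSome :=
          (PySem.List.index?_isSome_iff rest none).mpr hmem
        obtain ⟨j, hj⟩ := Option.isSome_iff_exists.mp this
        rw [hj]
        simp only [hj] at ih
        by_cases hk : v = some key
        · subst hk; simp [scanL, hmem, List.take_succ_cons]
        · have hk' : ¬ some key = v := fun h => hk h.symm
          simp [scanL, hmem, List.take_succ_cons, hv, hk, hv', hk', ← ih]
      · by_cases hk : v = some key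
        · subst hk; simp [scanL, hmem]
        · have hk' : ¬ some key = v := fun h => hk h.symm
          simp [scanL, hmem, hv, hk, hv', hk', ← ih]

-- table element reached at probe offset o = element o of the rotated list
theorem probe_get (t : List (Option Int)) (hn o : Nat)
    (hhn : hn < t.length) (ho : o < t.length) :
    (PySem.List.pyGet? t (PySem.Int.mod ((hn : Int) + (o : Int)) (t.length : Int))).getD none
      = (t.drop hn ++ t.take hn).getD o none := by
  have hcast : ((hn : Int) + (o : Int)) = ((hn + o : Nat) : Int) := by push_cast; ring
  rw [hcast, PySem.Int.mod_natCast]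
  rw [PySem.List.pyGet?_natCast]
  have hlt : (hn + o) % t.length < t.length := Nat.mod_lt _ (by omega)
  rw [List.getElem?_eq_getElem hlt]
  have ho2 : o < (t.drop hn ++ t.take hn).length := by
    simp; omega
  rw [List.getD_eq_getElem?_getD, List.getElem?_eq_getElem ho2]
  simp only [Option.getD_some]
  rcases lt_or_ge o (t.length - hn) with hcase | hcase
  · have hmod : (hn + o) % t.length = hn + o := Nat.mod_eq_of_lt (by omega)
    simp only [hmod]
    rw [List.getElem_append_left (by simp; omega)]
    simp [List.getElem_drop]
  · have hmod : (hn + o) % t.length = hn + o - t.length := by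
      have : hn + o < 2 * t.length := by omega
      rw [Nat.mod_eq_sub_mod (by omega), Nat.mod_eq_of_lt (by omega)]
    simp only [hmod]
    rw [List.getElem_append_right (by simp; omega)]
    simp only [List.length_drop]
    rw [List.getElem_take]
    congr 1
    omega

-- A's while-loop from probe offset o = the scan of the rotated list from o
theorem loop_eq_scan (t : List (Option Int)) (key : Int) (hn : Nat) (hhn : hn < t.length) :
    ∀ (f o : Nat), 1 ≤ o → o ≤ t.length → t.length ≤ o + f →
      searchWhile t key (hn : Int) (t.length : Int) f
          (PySem.Int.mod ((hn : Int) + (o : Int)) (t.length : Int))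
        = scanL key ((t.drop hn ++ t.take hn).drop o) := by
  intro f
  induction f with
  | zero =>
    intro o ho1 ho2 ho3
    have : o = t.length := by omega
    subst this
    rw [List.drop_of_length_le (by simp; omega)]
    simp [searchWhile, scanL]
  | succ f ih =>
    intro o ho1 ho2 ho3
    have hcast : ((hn : Int) + (o : Int)) = ((hn + o : Nat) : Int) := by push_cast; ring
    by_cases ho : o = t.length
    · subst ho
      rw [List.drop_of_length_le (by simp; omega)]
      rw [hcast, PySem.Int.mod_natCast]
      have : (hn + t.length) % t.length = hn := by
        rw [Nat.add_mod_right, Nat.mod_eq_of_lt hhn]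
      rw [this]
      simp [searchWhile, scanL]
    · have holt : o < t.length := by omega
      have hne : PySem.Int.mod ((hn : Int) + (o : Int)) (t.length : Int) ≠ (hn : Int) := by
        rw [hcast, PySem.Int.mod_natCast]
        intro h
        have h' : (hn + o) % t.length = hn := by exact_mod_cast h
        rcases lt_or_ge (hn + o) t.length with hc | hc
        · rw [Nat.mod_eq_of_lt hc] at h'; omega
        · rw [Nat.mod_eq_sub_mod hc, Nat.mod_eq_of_lt (by omega)] at h'; omega
      rw [searchWhile, if_neg hne]
      have hdrop : (t.drop hn ++ t.take hn).drop o
          = (t.drop hn ++ t.take hn).getD o none :: (t.drop hn ++ t.take hn).drop (o + 1) := by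
        have ho2' : o < (t.drop hn ++ t.take hn).length := by simp; omega
        rw [List.drop_eq_getElem_cons ho2', List.getD_eq_getElem?_getD,
          List.getElem?_eq_getElem ho2']
        rfl
      rw [hdrop]
      simp only [probe_get t hn o hhn holt, scanL]
      have hstep : rehashLinear (PySem.Int.mod ((hn : Int) + (o : Int)) (t.length : Int)) (t.length : Int)
          = PySem.Int.mod ((hn : Int) + ((o + 1 : Nat) : Int)) (t.length : Int) := by
        have hpos : (0 : Int) < (t.length : Int) := by exact_mod_cast (by omega : 0 < t.length)
        rw [rehashLinear, PySem.Int.mod_eq_emod_of_pos hpos, PySem.Int.mod_eq_emod_of_pos hpos,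
          PySem.Int.mod_eq_emod_of_pos hpos, Int.emod_add_emod]
        push_cast
        ring_nf
      rw [hstep]
      exact if_congr Iff.rfl rfl (if_congr Iff.rfl rfl (ih (o + 1) (by omega) (by omega) (by omega)))

-- ===== VERDICT (by name: the statement is the Claim_ definition above) =====
theorem search_spec : Claim_equal_search := by
  intro t key _ hpre
  unfold Spec_search search search_alt hashInt
  dsimp only
  have hn0 : 0 < t.length := List.length_pos_iff.mpr hpre
  have hpos : (0 : Int) < (t.length : Int) := by exact_mod_cast hn0
  have hk0 : 0 ≤ PySem.Int.mod key (t.length : Int) := PySem.Int.mod_nonneg key hpos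
  have hkn : PySem.Int.mod key (t.length : Int) < (t.length : Int) := PySem.Int.mod_lt key hpos
  obtain ⟨hn, hh⟩ := Int.eq_ofNat_of_zero_le hk0
  rw [hh]
  have htn : hn < t.length := by exact_mod_cast hh ▸ hkn
  -- B's slices are the rotation
  rw [PySem.List.slice_from t (Int.natCast_nonneg hn), PySem.List.slice_to t (Int.natCast_nonneg hn)]
  have htoNat : ((hn : Int)).toNat = hn := Int.toNat_natCast hn
  rw [htoNat]
  set probe := t.drop hn ++ t.take hn with hprobe
  -- B's expression is the first-match scan of the rotation
  have hB : (if probe.contains none then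
        (PySem.List.slice probe none (some ((((PySem.List.index? probe none).getD 0 : Nat)) : Int))).contains (some key)
      else probe.contains (some key)) = scanL key probe := by
    rw [PySem.List.slice_to_natCast]
    exact alt_eq_scan key probe
  rw [apply_ite (fun l : List (Option Int) => l.contains (some key)), hB]
  -- A's first slot is probe[0]
  have h0 : (PySem.List.pyGet? t (hn : Int)).getD none = probe.getD 0 none := by
    have := probe_get t hn 0 htn hn0
    rw [show ((hn : Int) + ((0 : Nat) : Int)) = ((hn : Nat) : Int) by push_cast; ring] at this
    rw [PySem.Int.mod_natCast, Nat.mod_eq_of_lt htn] at this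
    exact this
  have hdrop0 : probe = probe.getD 0 none :: probe.drop 1 := by
    have hl : 0 < probe.length := by simp [hprobe]; omega
    conv_lhs => rw [← List.drop_zero (l := probe)]
    rw [List.drop_eq_getElem_cons hl, List.getD_eq_getElem?_getD,
      List.getElem?_eq_getElem hl]
    rfl
  rw [h0]
  conv_rhs => rw [hdrop0]
  rw [show scanL key (probe.getD 0 none :: probe.drop 1)
      = (if probe.getD 0 none = some key then true else if probe.getD 0 none = none then false
          else scanL key (probe.drop 1)) from rfl]
  by_cases h1 : probe.getD 0 none = some key
  · rw [if_pos h1, if_pos h1]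
  · rw [if_neg h1, if_neg h1]
    by_cases h2 : probe.getD 0 none = none
    · rw [if_pos h2, if_pos h2]
    · rw [if_neg h2, if_neg h2]
      have hrehash : rehashLinear (hn : Int) (t.length : Int)
          = PySem.Int.mod ((hn : Int) + ((1 : Nat) : Int)) (t.length : Int) := by
        rw [rehashLinear]
        norm_num
      rw [hrehash]
      exact loop_eq_scan t key hn htn t.length 1 le_rfl (by omega) (by omega)
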